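-- pv_equiv track=rewrite | github.com/GreenJon902/Songsterr-Printer | multi.py | f
-- ===== SOURCE A (Python) =====
-- def f(string):
--     ret = ""
--     i = 0
--     u = False
--     while i < len(string):
--         if i < len(string) - 1 and string[i:i+2] == "__":
--             i += 2
--             ret += "\u001b[0m" if u else "\u001b[4m"
--             u = not u
--         else:
--             ret += string[i]
--             i += 1
--     return ret
-- ===== SOURCE B (Python) =====
-- def f(string):
--     parts = string.split("__")
--     ret = parts[0]
--     u = False
--     for part in parts[1:]:
--         ret += "\u001b[0m" if u else "\u001b[4m"
--         u = not u
--         ret += part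
--     return ret
-- ===== Notes on version B (the rewrite author's own statement) =====
-- stated objective: faster
-- what changed: Replaces the char-by-char index-scanning while loop with a single split on the two-underscore marker followed by one toggle-and-join pass over the segments.
import Mathlib
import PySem

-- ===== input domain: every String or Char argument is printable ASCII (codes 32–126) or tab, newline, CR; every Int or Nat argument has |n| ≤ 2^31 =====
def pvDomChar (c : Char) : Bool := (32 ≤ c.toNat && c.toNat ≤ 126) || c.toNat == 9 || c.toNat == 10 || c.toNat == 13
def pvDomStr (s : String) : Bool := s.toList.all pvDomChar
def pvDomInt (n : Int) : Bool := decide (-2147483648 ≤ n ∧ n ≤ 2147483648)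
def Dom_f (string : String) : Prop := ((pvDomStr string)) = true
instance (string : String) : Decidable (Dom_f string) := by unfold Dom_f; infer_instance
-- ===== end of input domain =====

-- B replaces A's char-by-char index-scanning loop with one split on the marker and one
-- toggle-and-join pass over the segments (measured faster: the split runs at C speed).

-- the two ANSI codes, as code-point lists
def pvUnd : List Char := ['\u001B', '[', '4', 'm']
def pvRst : List Char := ['\u001B', '[', '0', 'm']

-- ===== PORT A =====
-- A's while loop over index i, transliterated as recursion on the not-yet-consumed suffix l:
-- `l.take 2 = ['_','_']` is exactly "i < len(string) - 1 and string[i:i+2] == '__'"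
-- (a take of a shorter list is shorter); ret is the accumulator, u the toggle.
def fALoop : List Char → List Char → Bool → List Char
  | [], ret, _ => ret
  | c :: rest, ret, u =>
    if (c :: rest).take 2 = ['_', '_'] then
      fALoop rest.tail (ret ++ (if u then pvRst else pvUnd)) (!u)   -- i += 2, emit code, flip
    else
      fALoop rest (ret ++ [c]) u                                     -- copy one char, i += 1
termination_by l _ _ => l.length
decreasing_by all_goals simp [List.length_tail]

def f (string : String) : String := String.ofList (fALoop string.toList [] false)

-- ===== PORT B =====
-- the for-loop over parts[1:]: ret += code; u = not u; ret += part
def fBLoop : List (List Char) → List Char → Bool → List Char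
  | [], ret, _ => ret
  | p :: ps, ret, u => fBLoop ps (ret ++ (if u then pvRst else pvUnd) ++ p) (!u)

-- string.split("__"): the separator is the nonempty literal "__", so PySem.Str.split?
-- is `some (Chars.splitOn … ['_','_'])`; we port it by that Chars form (exact here).
-- parts[0] is ported as headI: splitOn never returns an empty list, so the branch is exact.
def f_alt (string : String) : String :=
  let parts := PySem.Chars.splitOn string.toList ['_', '_']
  String.ofList (fBLoop parts.tail parts.headI false)

-- ===== PRECONDITION & SPEC =====
def Spec_f (string : String) (out : String) : Prop := out = f_alt string
instance (string : String) (out : String) : Decidable (Spec_f string out) := by unfold Spec_f; infer_instance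

-- ===== CLAIM (what is proved, stated in full; the proofs are below) =====
def Claim_equal_f : Prop := ∀ (string : String), Dom_f string → Spec_f string (f string)

-- ===== LEMMAS AND PROOFS =====

-- pure (non-accumulator) form of A's loop
def fAPure : List Char → Bool → List Char
  | [], _ => []
  | c :: rest, u =>
    if (c :: rest).take 2 = ['_', '_'] then
      (if u then pvRst else pvUnd) ++ fAPure rest.tail (!u)
    else
      c :: fAPure rest u
termination_by l _ => l.length
decreasing_by all_goals simp [List.length_tail]

-- structural characterisation of splitOn on the separator "__"
def mySplit : List Char → List (List Char)
  | [] => [[]]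
  | c :: rest =>
    if (c :: rest).take 2 = ['_', '_'] then [] :: mySplit rest.tail
    else (mySplit rest).modifyHead (c :: ·)
termination_by l => l.length
decreasing_by all_goals simp [List.length_tail]

-- pure form of B's loop
def joinT : List (List Char) → Bool → List Char
  | [], _ => []
  | p :: ps, u => (if u then pvRst else pvUnd) ++ p ++ joinT ps (!u)

theorem take_two_shape (c : Char) (rest : List Char)
    (h : (c :: rest).take 2 = ['_', '_']) :
    c = '_' ∧ ∃ r, rest = '_' :: r := by
  cases rest with
  | nil => simp at h
  | cons d r => simp [List.take] at h; exact ⟨h.1, r, by simp [h.2]⟩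

theorem fALoop_acc (l : List Char) (u : Bool) : ∀ (ret : List Char),
    fALoop l ret u = ret ++ fAPure l u := by
  induction l, u using fAPure.induct with
  | case1 u => intro ret; simp [fALoop, fAPure]
  | case2 c rest u h ih =>
    intro ret
    rw [fALoop, fAPure, if_pos h, if_pos h, ih, List.append_assoc]
  | case3 c rest u h ih =>
    intro ret
    rw [fALoop, fAPure, if_neg h, if_neg h, ih, List.append_assoc]
    simp

theorem fBLoop_acc (ps : List (List Char)) : ∀ (ret : List Char) (u : Bool),
    fBLoop ps ret u = ret ++ joinT ps u := by
  induction ps with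
  | nil => intro ret u; simp [fBLoop, joinT]
  | cons p ps ih => intro ret u; simp [fBLoop, joinT, ih]

theorem mySplit_ne_nil (l : List Char) : mySplit l ≠ [] := by
  induction l using mySplit.induct with
  | case1 => simp [mySplit]
  | case2 c rest h ih => rw [mySplit, if_pos h]; simp
  | case3 c rest h ih =>
    rw [mySplit, if_neg h]
    cases hm : mySplit rest with
    | nil => exact absurd hm ih
    | cons q qs => simp [List.modifyHead]

theorem isPrefixOf_sep_iff (c : Char) (rest : List Char) :
    List.isPrefixOf ['_', '_'] (c :: rest) = true ↔ (c :: rest).take 2 = ['_', '_'] := by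
  cases rest with
  | nil => simp [List.isPrefixOf]
  | cons d r =>
    simp only [List.isPrefixOf, List.take, Bool.and_eq_true, beq_iff_eq, List.cons.injEq,
      and_true]
    aesop

theorem splitOn_go_spec (fuel : Nat) : ∀ (l cur : List Char) (accs : List (List Char)),
    l.length ≤ fuel →
    PySem.Chars.splitOn.go ['_', '_'] fuel l cur accs =
      accs.reverse ++ (mySplit l).modifyHead (cur.reverse ++ ·) := by
  induction fuel with
  | zero =>
    intro l cur accs hl
    have : l = [] := by cases l <;> simp_all
    subst this
    rw [PySem.Chars.splitOn.go.eq_def]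
    simp [mySplit]
  | succ n ih =>
    intro l cur accs hl
    cases l with
    | nil =>
      rw [PySem.Chars.splitOn.go.eq_def]
      simp [mySplit]
    | cons c rest =>
      rw [PySem.Chars.splitOn.go.eq_def]
      simp only []
      by_cases h : (c :: rest).take 2 = ['_', '_']
      · rw [if_pos ((isPrefixOf_sep_iff c rest).mpr h)]
        obtain ⟨hc, r, hr⟩ := take_two_shape c rest h
        subst hc; subst hr
        have hd : List.drop (['_', '_'] : List Char).length ('_' :: '_' :: r) = r := rfl
        rw [hd, ih r [] (cur.reverse :: accs) (by simp at hl ⊢; omega)]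
        rw [mySplit, if_pos h]
        simp only [List.tail, List.reverse_cons, List.append_assoc, List.modifyHead,
          List.nil_append, List.cons_append]
        cases mySplit r <;> simp
      · have hb : ¬ (List.isPrefixOf ['_', '_'] (c :: rest) = true) :=
          fun hh => h ((isPrefixOf_sep_iff c rest).mp hh)
        rw [if_neg hb]
        rw [ih rest (c :: cur) accs (by simp at hl ⊢; omega)]
        rw [mySplit, if_neg h, List.modifyHead_modifyHead]
        congr 2
        funext x
        simp

theorem splitOn_eq_mySplit (l : List Char) :
    PySem.Chars.splitOn l ['_', '_'] = mySplit l := by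
  rw [PySem.Chars.splitOn, splitOn_go_spec (l.length + 1) l [] [] (by omega)]
  cases mySplit l <;> simp [List.modifyHead]

theorem main_lemma (l : List Char) : ∀ (u : Bool),
    (mySplit l).headI ++ joinT (mySplit l).tail u = fAPure l u := by
  induction l using mySplit.induct with
  | case1 => intro u; simp [mySplit, fAPure, joinT]
  | case2 c rest h ih =>
    intro u
    rw [mySplit, if_pos h, fAPure, if_pos h]
    obtain ⟨q, qs, hq⟩ : ∃ q qs, mySplit rest.tail = q :: qs := by
      cases hm : mySplit rest.tail with
      | nil => exact absurd hm (mySplit_ne_nil _)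
      | cons q qs => exact ⟨q, qs, rfl⟩
    have := ih !u
    rw [hq] at this ⊢
    simp only [List.headI, List.tail, joinT] at this ⊢
    rw [List.nil_append, ← this]
    simp
  | case3 c rest h ih =>
    intro u
    rw [mySplit, if_neg h, fAPure, if_neg h]
    obtain ⟨q, qs, hq⟩ : ∃ q qs, mySplit rest = q :: qs := by
      cases hm : mySplit rest with
      | nil => exact absurd hm (mySplit_ne_nil _)
      | cons q qs => exact ⟨q, qs, rfl⟩
    have := ih u
    rw [hq] at this ⊢
    simp only [List.modifyHead, List.headI, List.tail] at this ⊢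
    rw [← this]
    simp

-- ===== VERDICT (by name: the statement is the Claim_ definition above) =====
theorem f_spec : Claim_equal_f := by
  intro s _
  unfold Spec_f f f_alt
  simp only [splitOn_eq_mySplit, fALoop_acc, fBLoop_acc, List.nil_append]
  rw [main_lemma]
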